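-- pv_equiv track=rewrite | github.com/gpyits/VSCodeProjects | Esercizi/Esercizi riepilogativi e di ripasso/isolated_num.py | count_isolated
-- ===== SOURCE A (Python) =====
-- def count_isolated(nums: list[int]) -> int:
--     if len(nums)==0:
--         return 0
--     elif len(nums)==1:
--         return 1
--     elif len(nums)==2:
--         return 0 if nums[0]==nums[1] else 2
--     else:
--         count=0
--         for r in range(1, len(nums)-1):
--             if nums[r]!=nums[r-1] and nums[r]!=nums[r+1]:
--                 count+=1
--         count+=1 if nums[0]!=nums[1] else 0
--         count+=1 if nums[-1]!=nums[-2] else 0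
--         return count
-- ===== SOURCE B (Python) =====
-- def count_isolated(nums: list[int]) -> int:
--     # Run-length view: an element is isolated exactly when it forms a maximal
--     # run of length 1, so count runs of length 1 in one pass.
--     count = 0
--     run = 0
--     prev = None
--     for x in nums:
--         if run > 0 and x == prev:
--             run += 1
--         else:
--             if run == 1:
--                 count += 1
--             run = 1
--             prev = x
--     if run == 1:
--         count += 1
--     return count
-- ===== Notes on version B (the rewrite author's own statement) =====
-- stated objective: alternative
-- what changed: Recasts the problem as run-length encoding: instead of comparing each element with both neighbors (with a 4-way length branch and endpoint fix-ups), B maintains the current run length in one pass and counts maximal runs of length exactly 1.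
import Mathlib
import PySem

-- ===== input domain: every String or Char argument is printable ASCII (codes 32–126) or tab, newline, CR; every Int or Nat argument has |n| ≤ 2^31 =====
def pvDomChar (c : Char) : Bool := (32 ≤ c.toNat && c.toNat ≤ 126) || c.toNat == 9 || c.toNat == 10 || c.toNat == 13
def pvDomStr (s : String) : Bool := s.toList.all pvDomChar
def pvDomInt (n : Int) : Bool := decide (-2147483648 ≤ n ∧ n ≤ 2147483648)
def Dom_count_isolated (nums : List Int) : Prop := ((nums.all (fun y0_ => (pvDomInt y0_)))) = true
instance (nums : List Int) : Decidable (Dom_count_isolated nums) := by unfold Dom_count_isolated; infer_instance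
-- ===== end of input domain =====

-- B recasts the task as run-length encoding: one pass maintaining the current run
-- length, counting maximal runs of length exactly 1, instead of A's 4-way length
-- branch, neighbor comparisons over interior indices, and endpoint fix-ups.
-- ===== PORT A =====
def count_isolated (nums : List Int) : Int :=
  if nums.length = 0 then 0
  else if nums.length = 1 then 1
  else if nums.length = 2 then
    (if PySem.List.pyGetD nums 0 0 = PySem.List.pyGetD nums 1 0 then 0 else 2)
  else
    let count : Int := (PySem.List.pyRange 1 ((nums.length : Int) - 1) 1).foldl
      (fun count r =>
        if PySem.List.pyGetD nums r 0 ≠ PySem.List.pyGetD nums (r - 1) 0 ∧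
           PySem.List.pyGetD nums r 0 ≠ PySem.List.pyGetD nums (r + 1) 0
        then count + 1 else count) 0
    let count := count + (if PySem.List.pyGetD nums 0 0 ≠ PySem.List.pyGetD nums 1 0 then 1 else 0)
    count + (if PySem.List.pyGetD nums (-1) 0 ≠ PySem.List.pyGetD nums (-2) 0 then 1 else 0)

-- ===== PORT B =====
-- the for-loop of Source B: state (count, run, prev), prev is None until the first element
def ciLoop (count run : Int) (prev : Option Int) : List Int → Int × Int × Option Int
  | [] => (count, run, prev)
  | x :: t =>
      if run > 0 ∧ some x = prev then ciLoop count (run + 1) prev t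
      else ciLoop (count + if run = 1 then 1 else 0) 1 (some x) t

def count_isolated_alt (nums : List Int) : Int :=
  let s := ciLoop 0 0 none nums
  s.1 + (if s.2.1 = 1 then 1 else 0)

-- ===== PRECONDITION & SPEC =====
def Spec_count_isolated (nums : List Int) (out : Int) : Prop := out = count_isolated_alt nums
instance (nums : List Int) (out : Int) : Decidable (Spec_count_isolated nums out) := by unfold Spec_count_isolated; infer_instance

-- ===== CLAIM (what is proved, stated in full; the proofs are below) =====
def Claim_equal_count_isolated : Prop := ∀ (nums : List Int), Dom_count_isolated nums → Spec_count_isolated nums (count_isolated nums)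

-- ===== LEMMAS AND PROOFS =====

-- reference function: count of isolated elements in cur :: l, where pd says whether
-- cur differs from its (missing or real) predecessor
def iso2 (pd : Bool) (cur : Int) : List Int → Int
  | [] => if pd then 1 else 0
  | x :: t => (if pd = true ∧ ¬ cur = x then 1 else 0) + iso2 (decide (¬ x = cur)) x t

def isoT : List Int → Int
  | [] => 0
  | x :: t => iso2 true x t

-- index-based intermediate form (A's value as a count over all indices)
def idxCnt (nums : List Int) : Int :=
  let n : Int := nums.length
  ((PySem.List.pyRange 0 n 1).countP (fun i =>
      (i == 0 || PySem.List.pyGetD nums i 0 != PySem.List.pyGetD nums (i - 1) 0) &&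
      (i == n - 1 || PySem.List.pyGetD nums i 0 != PySem.List.pyGetD nums (i + 1) 0)) : Int)

-- same count with Nat indices
def natCnt (l : List Int) : Int :=
  ((List.range l.length).countP (fun i =>
      (i == 0 || decide (¬ l.getD i 0 = l.getD (i - 1) 0)) &&
      (i == l.length - 1 || decide (¬ l.getD i 0 = l.getD (i + 1) 0))) : Int)

-- generalized Nat-index predicate over cur :: l with explicit "differs from predecessor" flag
def P2 (pd : Bool) (cur : Int) (l : List Int) (i : Nat) : Bool :=
  (if i = 0 then pd else decide (¬ (cur :: l).getD i 0 = (cur :: l).getD (i - 1) 0)) &&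
  ((i == l.length) || decide (¬ (cur :: l).getD i 0 = (cur :: l).getD (i + 1) 0))

theorem A_eq_idx (nums : List Int) : count_isolated nums = idxCnt nums := by
  match nums with
  | [] => simp [count_isolated, idxCnt, PySem.List.pyRange_one_eq_nil]
  | [a] =>
      have hr : PySem.List.pyRange 0 (1:Int) 1 = [0] := by decide
      simp [count_isolated, idxCnt, hr]
  | [a, b] =>
      have hr : PySem.List.pyRange 0 (2:Int) 1 = [0, 1] := by decide
      by_cases hab : a = b
      · simp [count_isolated, idxCnt, hr, PySem.List.pyGetD_ofNat', hab]
      · have hba : ¬ b = a := fun h => hab h.symm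
        simp [count_isolated, idxCnt, hr, PySem.List.pyGetD_ofNat', hab, hba]
  | a :: b :: c :: t =>
      set nums := a :: b :: c :: t with hnums
      have hlen : 3 ≤ nums.length := by simp [hnums]
      set n : Int := (nums.length : Int) with hn
      have hn3 : 3 ≤ n := by omega
      have hsplit : PySem.List.pyRange 0 n 1 = 0 :: (PySem.List.pyRange 1 (n-1) 1 ++ [n-1]) := by
        rw [PySem.List.pyRange_one_cons (by omega : (0:Int) < n)]
        congr 1
        conv_lhs => rw [show n = (n-1)+1 by ring]
        exact PySem.List.pyRange_one_succ_right (by omega)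
      have hA : count_isolated nums =
          (PySem.List.pyRange 1 (n - 1) 1).foldl
            (fun count r =>
              if PySem.List.pyGetD nums r 0 ≠ PySem.List.pyGetD nums (r - 1) 0 ∧
                 PySem.List.pyGetD nums r 0 ≠ PySem.List.pyGetD nums (r + 1) 0
              then count + 1 else count) 0
          + (if PySem.List.pyGetD nums 0 0 ≠ PySem.List.pyGetD nums 1 0 then 1 else 0)
          + (if PySem.List.pyGetD nums (-1) 0 ≠ PySem.List.pyGetD nums (-2) 0 then 1 else 0) := by
        rw [count_isolated]
        rw [if_neg (by omega), if_neg (by omega), if_neg (by omega)]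
      rw [hA]
      rw [PySem.List.foldl_ite_add_one]
      rw [idxCnt]
      simp only [← hn, hsplit, List.countP_cons, List.countP_append]
      have hint : (PySem.List.pyRange 1 (n-1) 1).countP
            (fun i => (i == 0 || PySem.List.pyGetD nums i 0 != PySem.List.pyGetD nums (i - 1) 0) &&
              (i == n - 1 || PySem.List.pyGetD nums i 0 != PySem.List.pyGetD nums (i + 1) 0))
          = (PySem.List.pyRange 1 (n-1) 1).countP
            (fun r => decide (PySem.List.pyGetD nums r 0 ≠ PySem.List.pyGetD nums (r - 1) 0 ∧
               PySem.List.pyGetD nums r 0 ≠ PySem.List.pyGetD nums (r + 1) 0)) := by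
        apply List.countP_congr
        intro i hi
        have hm := PySem.List.mem_pyRange_one.mp hi
        have h0 : ¬ (i = 0) := by omega
        have h1 : ¬ (i = n - 1) := by omega
        simp [h0, h1]
      have e1 : PySem.List.pyGetD nums (0:Int) 0 = nums.getD 0 0 := by
        rw [show ((0:Int)) = (OfNat.ofNat 0 : Int) from rfl, PySem.List.pyGetD_ofNat']
      have e2 : PySem.List.pyGetD nums (1:Int) 0 = nums.getD 1 0 := by
        rw [show ((1:Int)) = (OfNat.ofNat 1 : Int) from rfl, PySem.List.pyGetD_ofNat']
      have elast : PySem.List.pyGetD nums (-1) 0 = PySem.List.pyGetD nums (n-1) 0 := by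
        rw [PySem.List.pyGetD_neg_ofNat nums 1 0 (by omega) (by omega),
          PySem.List.pyGetD_eq_getElem nums 0 (by omega) (by omega)]
        congr 1; omega
      have eprev : PySem.List.pyGetD nums (-2) 0 = PySem.List.pyGetD nums (n-1-1) 0 := by
        rw [PySem.List.pyGetD_neg_ofNat nums 2 0 (by omega) (by omega),
          PySem.List.pyGetD_eq_getElem nums 0 (by omega) (by omega)]
        congr 1; omega
      have p0 : (((0:Int) == 0 || PySem.List.pyGetD nums 0 0 != PySem.List.pyGetD nums (0 - 1) 0) &&
          ((0:Int) == n - 1 || PySem.List.pyGetD nums 0 0 != PySem.List.pyGetD nums (0 + 1) 0))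
          = (decide (PySem.List.pyGetD nums 0 0 ≠ PySem.List.pyGetD nums 1 0)) := by
        have hb : ((0:Int) == n - 1) = false := beq_eq_false_iff_ne.mpr (by omega)
        simp [hb, bne, Bool.beq_eq_decide_eq]
      have plast : (((n-1:Int) == 0 || PySem.List.pyGetD nums (n-1) 0 != PySem.List.pyGetD nums (n-1-1) 0) &&
          ((n-1:Int) == n - 1 || PySem.List.pyGetD nums (n-1) 0 != PySem.List.pyGetD nums (n-1+1) 0))
          = (decide (PySem.List.pyGetD nums (-1) 0 ≠ PySem.List.pyGetD nums (-2) 0)) := by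
        have hb : ((n-1:Int) == 0) = false := beq_eq_false_iff_ne.mpr (by omega)
        simp [hb, bne, Bool.beq_eq_decide_eq, elast, eprev]
      rw [hint, p0, plast]
      simp only [List.countP_nil, decide_eq_true_eq]
      by_cases c1 : PySem.List.pyGetD nums 0 0 ≠ PySem.List.pyGetD nums 1 0 <;>
        by_cases c2 : PySem.List.pyGetD nums (-1) 0 ≠ PySem.List.pyGetD nums (-2) 0 <;>
        simp [c1, c2]

theorem idx_eq_nat (l : List Int) : idxCnt l = natCnt l := by
  rw [idxCnt, natCnt]
  have hrw : PySem.List.pyRange 0 ((l.length : Int)) 1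
      = (List.range l.length).map (fun k : Nat => ((0 : Int) + k)) := by
    rw [PySem.List.pyRange_one]
    simp
  simp only [hrw, List.countP_map]
  congr 1
  apply List.countP_congr
  intro i hi
  have hi' : i < l.length := List.mem_range.mp hi
  simp only [Function.comp_apply, zero_add]
  rw [Bool.eq_iff_iff]
  simp only [Bool.and_eq_true, Bool.or_eq_true, beq_iff_eq, bne_iff_ne, decide_eq_true_eq]
  have c0 : ((i : Int) = 0) ↔ (i = 0) := by omega
  have c1 : ((i : Int) = (l.length : Int) - 1) ↔ (i = l.length - 1) := by omega
  have g1 : PySem.List.pyGetD l (i : Int) 0 = l.getD i 0 := by simp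
  rw [c0, c1, g1]
  by_cases h0 : i = 0
  · subst h0
    by_cases hl : 0 = l.length - 1
    · have hl2 : l.length - 1 = 0 := hl.symm
      simp [hl2]
    · simp [hl, PySem.List.pyGetD_ofNat', List.getD_eq_getElem?_getD]
  · rw [show ((i : Int) - 1) = (((i - 1 : Nat)) : Int) by omega,
        PySem.List.pyGetD_natCast]
    by_cases hl : i = l.length - 1
    · simp [hl, List.getD_eq_getElem?_getD]
    · rw [show ((i : Int) + 1) = (((i + 1 : Nat)) : Int) by push_cast; ring,
          PySem.List.pyGetD_natCast]
      simp [h0, hl, List.getD_eq_getElem?_getD]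

theorem P2_eq_iso2 (l : List Int) : ∀ (pd : Bool) (cur : Int),
    ((List.range (l.length + 1)).countP (P2 pd cur l) : Int) = iso2 pd cur l := by
  induction l with
  | nil =>
      intro pd cur
      by_cases hpd : pd = true <;> simp [P2, iso2, hpd, List.range_succ]
  | cons x t ih =>
      intro pd cur
      have h0 : P2 pd cur (x :: t) 0 = (pd && decide (¬ cur = x)) := by
        simp [P2]
      have hs : ∀ i : Nat, P2 pd cur (x :: t) (i + 1) = P2 (decide (¬ x = cur)) x t i := by
        intro i
        cases i with
        | zero => simp [P2]; cases t <;> simp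
        | succ j => simp [P2]
      have hrw : List.range ((x :: t).length + 1)
          = 0 :: (List.range (t.length + 1)).map Nat.succ := by
        simp [List.range_succ_eq_map]
      rw [hrw, List.countP_cons, List.countP_map]
      have hfun : (P2 pd cur (x :: t)) ∘ Nat.succ = P2 (decide (¬ x = cur)) x t := by
        funext i; exact hs i
      rw [hfun, h0]
      push_cast [ih]
      by_cases hpd : pd = true <;> by_cases hcx : cur = x <;>
        simp [iso2, hpd, hcx] <;> ring

theorem nat_eq_isoT (l : List Int) : natCnt l = isoT l := by
  cases l with
  | nil => simp [natCnt, isoT]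
  | cons x t =>
      have hfun : (fun i : Nat =>
          (i == 0 || decide (¬ (x :: t).getD i 0 = (x :: t).getD (i - 1) 0)) &&
          (i == (x :: t).length - 1 || decide (¬ (x :: t).getD i 0 = (x :: t).getD (i + 1) 0)))
          = P2 true x t := by
        funext i
        cases i with
        | zero => simp [P2]
        | succ j => simp [P2]
      rw [natCnt, hfun, show (x :: t).length = t.length + 1 from rfl, P2_eq_iso2, isoT]

theorem loop_inv (l : List Int) : ∀ (count run : Int) (p : Int), 1 ≤ run →
    (ciLoop count run (some p) l).1 + (if (ciLoop count run (some p) l).2.1 = 1 then 1 else 0)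
      = count + iso2 (decide (run = 1)) p l := by
  induction l with
  | nil =>
      intro count run p hrun
      by_cases h1 : run = 1 <;> simp [ciLoop, iso2, h1]
  | cons x t ih =>
      intro count run p hrun
      by_cases hx : x = p
      · have hc : (run > 0 ∧ some x = some p) := ⟨by omega, by rw [hx]⟩
        rw [show ciLoop count run (some p) (x :: t) = ciLoop count (run + 1) (some p) t from by
          simp [ciLoop, hc]]
        rw [ih count (run + 1) p (by omega)]
        have h1 : ¬ (run + 1 = 1) := by omega
        subst hx
        simp [iso2, h1]
      · have hc : ¬ (run > 0 ∧ some x = some p) := by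
          rintro ⟨-, h⟩; exact hx (Option.some.injEq .. ▸ h)
        rw [show ciLoop count run (some p) (x :: t)
              = ciLoop (count + if run = 1 then 1 else 0) 1 (some x) t from by
          simp only [ciLoop, if_neg hc]]
        rw [ih _ 1 x (by omega)]
        have hpx : ¬ p = x := fun h => hx h.symm
        by_cases h1 : run = 1 <;> simp [iso2, h1, hpx, hx] <;> ring

theorem alt_eq_isoT (nums : List Int) : count_isolated_alt nums = isoT nums := by
  cases nums with
  | nil => simp [count_isolated_alt, ciLoop, isoT]
  | cons x t =>
      show (ciLoop 0 0 none (x :: t)).1 + (if (ciLoop 0 0 none (x :: t)).2.1 = 1 then 1 else 0)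
        = isoT (x :: t)
      rw [show ciLoop 0 0 none (x :: t) = ciLoop 0 1 (some x) t from by simp [ciLoop]]
      rw [loop_inv t 0 1 x (by omega)]
      simp [isoT]

-- ===== VERDICT (by name: the statement is the Claim_ definition above) =====
theorem count_isolated_spec : Claim_equal_count_isolated := by
  intro nums _
  show count_isolated nums = count_isolated_alt nums
  rw [A_eq_idx, idx_eq_nat, nat_eq_isoT, alt_eq_isoT]
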